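-- pv_equiv track=rewrite | github.com/EdikSimonian/CServer | app.py | Love
-- ===== SOURCE A (Python) =====
-- Char32 = bytearray([0,0,0,0,0,0,0,0])
--
-- def RenderChar(CharNew):
-- 	result = ""
-- 	for c in CharNew:
-- 		result += str(c) + " "
-- 	return result
--
-- def Love(lenght):
-- 	for i in range(0, lenght):
-- 		yield str(777) + " "
-- 		yield RenderChar(Char32)
--
-- 		yield str(777) + " "
-- 		yield RenderChar(bytearray([0,0,0,0,24,24,0,0]))
--
-- 		yield str(777) + " "
-- 		yield RenderChar(bytearray([0,0,0,60,60,60,60,0]))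
--
-- 		yield str(777) + " "
-- 		yield RenderChar(bytearray([0,0,102,255,255,126,60,24]))
--
-- 		yield str(777) + " "
-- 		yield RenderChar(bytearray([0,102,255,255,126,60,24,0]))
--
-- 		yield str(777) + " "
-- 		yield RenderChar(bytearray([102,255,255,126,60,24,0,0]))
--
-- 		yield str(777) + " "
-- 		yield RenderChar(bytearray([0,102,255,255,126,60,24,0]))
--
-- 		yield str(777) + " "
-- 		yield RenderChar(bytearray([0,0,102,255,255,126,60,24]))
--
-- 		yield str(777) + " "
-- 		yield RenderChar(bytearray([0,0,0,60,60,60,60,0]))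
--
-- 		yield str(777) + " "
-- 		yield RenderChar(bytearray([0,0,0,0,24,24,0,0]))
-- ===== SOURCE B (Python) =====
-- Char32 = bytearray([0,0,0,0,0,0,0,0])
--
-- GLYPHS = [
--     Char32,
--     bytearray([0,0,0,0,24,24,0,0]),
--     bytearray([0,0,0,60,60,60,60,0]),
--     bytearray([0,0,102,255,255,126,60,24]),
--     bytearray([0,102,255,255,126,60,24,0]),
--     bytearray([102,255,255,126,60,24,0,0]),
--     bytearray([0,102,255,255,126,60,24,0]),
--     bytearray([0,0,102,255,255,126,60,24]),
--     bytearray([0,0,0,60,60,60,60,0]),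
--     bytearray([0,0,0,0,24,24,0,0]),
-- ]
--
-- def Love(lenght):
--     # Stage 1: render one full cycle of output strings exactly once.
--     block = []
--     for g in GLYPHS:
--         block.append("777 ")
--         block.append(" ".join(map(str, g)) + " ")
--     # Stage 2: replicate the prebuilt cycle lenght times (negative -> empty).
--     yield from block * lenght
-- ===== Notes on version B (the rewrite author's own statement) =====
-- stated objective: faster
-- what changed: B renders one full cycle of output strings exactly once into a list (via ' '.join over each glyph) and then replicates that prebuilt list lenght times with Python list multiplication, instead of re-rendering every bytearray from scratch on each loop iteration as A does.
import Mathlib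
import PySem

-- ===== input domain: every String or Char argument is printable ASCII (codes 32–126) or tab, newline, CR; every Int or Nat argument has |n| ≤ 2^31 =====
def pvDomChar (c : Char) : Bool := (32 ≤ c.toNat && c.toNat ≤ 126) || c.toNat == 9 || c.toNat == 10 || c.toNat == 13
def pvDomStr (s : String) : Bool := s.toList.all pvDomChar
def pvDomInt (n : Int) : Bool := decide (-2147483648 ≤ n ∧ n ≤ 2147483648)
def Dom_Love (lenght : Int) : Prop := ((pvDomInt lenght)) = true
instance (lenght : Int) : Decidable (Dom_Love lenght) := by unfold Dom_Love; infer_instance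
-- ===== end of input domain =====

-- B prebuilds the strings of one cycle once and replicates that list lenght times
-- (Python list multiplication), instead of re-rendering every glyph each iteration (objective: faster, constant-factor: the glyphs are rendered once, not per iteration).
-- Both generators are ported as the list of all yielded strings.

-- ===== PORT A =====
def Char32 : List Int := [0,0,0,0,0,0,0,0]

-- result = ""; for c in CharNew: result += str(c) + " "
def RenderChar (CharNew : List Int) : String :=
  CharNew.foldl (fun result c => result ++ PySem.Int.toStr c ++ " ") ""

def Love (lenght : Int) : List String :=
  (PySem.List.pyRange 0 lenght 1).foldl (fun acc _ =>
    acc ++ [PySem.Int.toStr 777 ++ " ", RenderChar Char32,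
            PySem.Int.toStr 777 ++ " ", RenderChar [0,0,0,0,24,24,0,0],
            PySem.Int.toStr 777 ++ " ", RenderChar [0,0,0,60,60,60,60,0],
            PySem.Int.toStr 777 ++ " ", RenderChar [0,0,102,255,255,126,60,24],
            PySem.Int.toStr 777 ++ " ", RenderChar [0,102,255,255,126,60,24,0],
            PySem.Int.toStr 777 ++ " ", RenderChar [102,255,255,126,60,24,0,0],
            PySem.Int.toStr 777 ++ " ", RenderChar [0,102,255,255,126,60,24,0],
            PySem.Int.toStr 777 ++ " ", RenderChar [0,0,102,255,255,126,60,24],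
            PySem.Int.toStr 777 ++ " ", RenderChar [0,0,0,60,60,60,60,0],
            PySem.Int.toStr 777 ++ " ", RenderChar [0,0,0,0,24,24,0,0]]) []

-- ===== PORT B =====
def GLYPHS : List (List Int) :=
  [Char32,
   [0,0,0,0,24,24,0,0],
   [0,0,0,60,60,60,60,0],
   [0,0,102,255,255,126,60,24],
   [0,102,255,255,126,60,24,0],
   [102,255,255,126,60,24,0,0],
   [0,102,255,255,126,60,24,0],
   [0,0,102,255,255,126,60,24],
   [0,0,0,60,60,60,60,0],
   [0,0,0,0,24,24,0,0]]

-- " ".join(map(str, g)) + " "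
def RenderCharB (g : List Int) : String :=
  String.intercalate " " (g.map PySem.Int.toStr) ++ " "

-- block = []; for g in GLYPHS: block.append("777 "); block.append(RenderCharB g)
def BLOCK : List String :=
  GLYPHS.foldl (fun block g => block ++ ["777 ", RenderCharB g]) []

-- block * lenght : Python list repetition; a non-positive count gives [] — exact.
def Love_alt (lenght : Int) : List String :=
  (List.replicate lenght.toNat BLOCK).flatten

-- ===== PRECONDITION & SPEC =====
def Spec_Love (lenght : Int) (out : List String) : Prop := out = Love_alt lenght
instance (lenght : Int) (out : List String) : Decidable (Spec_Love lenght out) := by unfold Spec_Love; infer_instance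

-- ===== CLAIM (what is proved, stated in full; the proofs are below) =====
def Claim_equal_Love : Prop := ∀ (lenght : Int), Dom_Love lenght → Spec_Love lenght (Love lenght)

-- ===== LEMMAS AND PROOFS =====

-- A's per-iteration list of 20 literal strings is exactly B's prebuilt BLOCK
theorem blockA_eq_BLOCK :
    [PySem.Int.toStr 777 ++ " ", RenderChar Char32,
     PySem.Int.toStr 777 ++ " ", RenderChar [0,0,0,0,24,24,0,0],
     PySem.Int.toStr 777 ++ " ", RenderChar [0,0,0,60,60,60,60,0],
     PySem.Int.toStr 777 ++ " ", RenderChar [0,0,102,255,255,126,60,24],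
     PySem.Int.toStr 777 ++ " ", RenderChar [0,102,255,255,126,60,24,0],
     PySem.Int.toStr 777 ++ " ", RenderChar [102,255,255,126,60,24,0,0],
     PySem.Int.toStr 777 ++ " ", RenderChar [0,102,255,255,126,60,24,0],
     PySem.Int.toStr 777 ++ " ", RenderChar [0,0,102,255,255,126,60,24],
     PySem.Int.toStr 777 ++ " ", RenderChar [0,0,0,60,60,60,60,0],
     PySem.Int.toStr 777 ++ " ", RenderChar [0,0,0,0,24,24,0,0]]
    = BLOCK := by
  decide

-- appending a fixed block per element = flatten of (length-many) copies of the block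
theorem foldl_const_block {α : Type} (B : List String) :
    ∀ (l : List α) (acc : List String),
      l.foldl (fun a (_ : α) => a ++ B) acc = acc ++ (List.replicate l.length B).flatten
  | [], acc => by simp
  | _ :: t, acc => by
    simp [List.foldl, List.replicate_succ, foldl_const_block B t (acc ++ B), List.append_assoc]

-- ===== VERDICT (by name: the statement is the Claim_ definition above) =====
theorem Love_spec : Claim_equal_Love := by
  intro lenght _
  unfold Spec_Love Love Love_alt
  rw [blockA_eq_BLOCK, foldl_const_block, PySem.List.length_pyRange_one]
  simp
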